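-- pv_equiv track=rewrite | github.com/mehuljain133/NP-COMPLETENESS-AND-APPROXIMATION-ALGORITHMS-PG-Projects | Introduction.py | reduce_3sat_to_clique
-- ===== SOURCE A (Python) =====
-- def reduce_3sat_to_clique(cnf_formula):
--     """
--     Reduces a 3-SAT instance to a graph used for the CLIQUE problem.
--     CNF format: List of clauses, each a list of 3 literals (e.g., [['x1', '-x2', 'x3'], ...])
--     """
--     graph = {}
--     node_map = {}
--     node_id = 0
--
--     # Create one node for each literal in each clause
--     for i, clause in enumerate(cnf_formula):
--         for literal in clause:
--             node_name = f"{i}_{literal}"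
--             graph[node_name] = set()
--             node_map[node_name] = (i, literal)
--             node_id += 1
--
--     # Connect nodes from different clauses if they are not complementary
--     for u in graph:
--         for v in graph:
--             if u != v:
--                 clause_u, lit_u = node_map[u]
--                 clause_v, lit_v = node_map[v]
--                 if clause_u != clause_v and lit_u != negate(lit_v):
--                     graph[u].add(v)
--
--     return graph, len(cnf_formula)
--
-- def negate(literal):
--     """Negate a literal string."""
--     if literal.startswith('-'):
--         return literal[1:]
--     else:
--         return '-' + literal
-- ===== SOURCE B (Python) =====
-- def negate(literal):
--     """Negate a literal string."""
--     if literal.startswith('-'):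
--         return literal[1:]
--     else:
--         return '-' + literal
--
-- def reduce_3sat_to_clique(cnf_formula):
--     """
--     Same reduction organized by clause pairs: first collect, per clause,
--     its distinct nodes (name, literal); then visit each unordered pair of
--     clauses i < j once and emit the edges in both directions, testing each
--     direction's non-complementarity separately.
--     """
--     clauses = []
--     for i, clause in enumerate(cnf_formula):
--         nodes = {}
--         for literal in clause:
--             nodes[f"{i}_{literal}"] = literal
--         clauses.append(list(nodes.items()))
--
--     graph = {u: set() for nodes in clauses for u, _ in nodes}
--
--     for i, ci in enumerate(clauses):
--         for cj in clauses[i + 1:]: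
--             for u, lu in ci:
--                 for v, lv in cj:
--                     if lu != negate(lv):
--                         graph[u].add(v)
--                     if lv != negate(lu):
--                         graph[v].add(u)
--
--     return graph, len(cnf_formula)
-- ===== Notes on version B (the rewrite author's own statement) =====
-- stated objective: alternative
-- what changed: A scans all ordered pairs of nodes of a single flat graph dict and tests clause inequality inside the loop; B groups the distinct nodes per clause first, then visits each unordered pair of distinct clauses exactly once and emits the edges of that clause pair in both directions, so the clause-inequality test disappears from the inner loop.
import Mathlib
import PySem

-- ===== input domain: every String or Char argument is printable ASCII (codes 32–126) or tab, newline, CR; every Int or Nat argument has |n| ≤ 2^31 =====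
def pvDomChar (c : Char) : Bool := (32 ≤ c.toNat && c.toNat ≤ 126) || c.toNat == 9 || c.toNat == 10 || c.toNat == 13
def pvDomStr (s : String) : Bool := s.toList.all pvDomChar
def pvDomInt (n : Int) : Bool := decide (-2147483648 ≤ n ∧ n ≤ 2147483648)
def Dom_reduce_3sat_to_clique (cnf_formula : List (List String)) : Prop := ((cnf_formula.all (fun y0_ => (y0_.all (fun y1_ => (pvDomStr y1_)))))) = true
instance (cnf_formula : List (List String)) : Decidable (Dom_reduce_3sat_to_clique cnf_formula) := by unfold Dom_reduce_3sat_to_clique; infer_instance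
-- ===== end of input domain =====

-- B reorganizes A's flat all-node-pairs scan into a per-clause decomposition: distinct nodes are
-- collected per clause, then each unordered pair of clauses is visited once and edges are emitted
-- in both directions (objective: alternative decomposition; same asymptotic cost).

-- ===== PORT A =====

-- module helper `negate` (used by both versions)
def pvNegate (literal : String) : String :=
  if PySem.Str.startswith literal "-" then PySem.Str.slice literal (some 1) none
  else "-" ++ literal

-- f"{i}_{literal}"
def pvNodeName (i : Int) (literal : String) : String :=
  PySem.Int.toStr i ++ "_" ++ literal

def reduce_3sat_to_clique (cnf_formula : List (List String)) : (List (String × List String)) × Int :=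
  -- graph = {}; node_map = {}; node_id = 0; first loop nest (inserts into both dicts, bumps node_id)
  let st := (PySem.List.enumerate cnf_formula).foldl
    (fun (st : PySem.Dict String (PySem.Set String) × PySem.Dict String (Int × String) × Int) ic =>
      ic.2.foldl (fun st literal =>
        let node_name := pvNodeName ic.1 literal
        (st.1.insert node_name PySem.Set.empty,
         st.2.1.insert node_name (ic.1, literal),
         st.2.2 + 1)) st)
    (PySem.Dict.empty, PySem.Dict.empty, (0 : Int))
  let graph := st.1
  let node_map := st.2.1
  -- `for u in graph: for v in graph:` — phase 2 only rewrites values of existing keys, so the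
  -- iteration is over the fixed key sequence of `graph`.
  let graph2 := graph.keys.foldl (fun g u =>
    graph.keys.foldl (fun g v =>
      if u ≠ v then
        -- node_map[u] / node_map[v]: exact — u, v are always keys of node_map (inserted in lock-step with graph's keys)
        let cu := node_map.getD u ((0 : Int), "")
        let cv := node_map.getD v ((0 : Int), "")
        if cu.1 ≠ cv.1 ∧ cu.2 ≠ pvNegate cv.2 then
          g.modify u PySem.Set.empty (fun s => PySem.Set.add s v)
        else g
      else g) g) graph
  (graph2.items, (cnf_formula.length : Int))

-- ===== PORT B =====
def reduce_3sat_to_clique_alt (cnf_formula : List (List String)) : (List (String × List String)) × Int :=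
  -- per clause: nodes = {f"{i}_{literal}": literal}; clauses.append(list(nodes.items()))
  let clauses := (PySem.List.enumerate cnf_formula).map (fun ic =>
    (ic.2.foldl (fun (d : PySem.Dict String String) literal =>
      d.insert (pvNodeName ic.1 literal) literal) PySem.Dict.empty).items)
  -- graph = {u: set() for nodes in clauses for u, _ in nodes}
  let graph0 := clauses.foldl (fun (g : PySem.Dict String (PySem.Set String)) nodes =>
    nodes.foldl (fun g ul => g.insert ul.1 PySem.Set.empty) g) PySem.Dict.empty
  -- for i, ci in enumerate(clauses): for cj in clauses[i+1:]: for u,lu in ci: for v,lv in cj: …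
  let graph := (PySem.List.enumerate clauses).foldl (fun g ic =>
    (PySem.List.slice clauses (some (ic.1 + 1)) none).foldl (fun g cj =>
      ic.2.foldl (fun g ul =>
        cj.foldl (fun (g : PySem.Dict String (PySem.Set String)) vl =>
          let g1 := if ul.2 ≠ pvNegate vl.2 then
              g.modify ul.1 PySem.Set.empty (fun s => PySem.Set.add s vl.1) else g
          if vl.2 ≠ pvNegate ul.2 then
              g1.modify vl.1 PySem.Set.empty (fun s => PySem.Set.add s ul.1) else g1) g) g) g) graph0
  (graph.items, (cnf_formula.length : Int))

-- ===== PRECONDITION & SPEC =====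
def Spec_reduce_3sat_to_clique (cnf_formula : List (List String)) (out : (List (String × List String)) × Int) : Prop := out = reduce_3sat_to_clique_alt cnf_formula
instance (cnf_formula : List (List String)) (out : (List (String × List String)) × Int) : Decidable (Spec_reduce_3sat_to_clique cnf_formula out) := by unfold Spec_reduce_3sat_to_clique; infer_instance

-- ===== CLAIM (what is proved, stated in full; the proofs are below) =====
def Claim_equal_reduce_3sat_to_clique : Prop := ∀ (cnf_formula : List (List String)), Dom_reduce_3sat_to_clique cnf_formula → Spec_reduce_3sat_to_clique cnf_formula (reduce_3sat_to_clique cnf_formula)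

-- ===== LEMMAS AND PROOFS =====

-- ---------- shared canonical data ----------

-- the (clause index, literal) pairs in scan order
def pvPairs (cnf : List (List String)) : List (Int × String) :=
  (PySem.List.enumerate cnf).flatMap (fun ic => ic.2.map (fun lit => (ic.1, lit)))

def pvKey (p : Int × String) : String := pvNodeName p.1 p.2

-- the node_map/info dict (A builds it in its first loop nest)
def pvInfo (cnf : List (List String)) : PySem.Dict String (Int × String) :=
  (pvPairs cnf).foldl (fun d p => d.insert (pvKey p) (p.1, p.2)) PySem.Dict.empty

-- the canonical value both ports are reduced to
def pvCanon (cnf : List (List String)) : List (String × List String) :=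
  (pvInfo cnf).items.map (fun ul =>
    (ul.1, PySem.Set.ofList
      (((pvInfo cnf).items.filter
          (fun vl => decide (vl.2.1 ≠ ul.2.1 ∧ ul.2.2 ≠ pvNegate vl.2.2))).map (·.1))))

-- ---------- A-side lemmas (A = pvCanon) ----------

-- the initial graph dict of A (every value ∅)
def pvGraph0 (cnf : List (List String)) : PySem.Dict String (PySem.Set String) :=
  (pvPairs cnf).foldl (fun d p => d.insert (pvKey p) PySem.Set.empty) PySem.Dict.empty

-- A's edge condition, as a Bool on node names
def pvCondA (nm : PySem.Dict String (Int × String)) (u v : String) : Bool :=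
  decide (u ≠ v) &&
    (let cu := nm.getD u ((0 : Int), "")
     let cv := nm.getD v ((0 : Int), "")
     decide (cu.1 ≠ cv.1 ∧ cu.2 ≠ pvNegate cv.2))

-- the one step of A's first loop nest, on a (clause,literal) pair
def pvTripleStep (st : PySem.Dict String (PySem.Set String) × PySem.Dict String (Int × String) × Int)
    (p : Int × String) : PySem.Dict String (PySem.Set String) × PySem.Dict String (Int × String) × Int :=
  (st.1.insert (pvKey p) PySem.Set.empty, st.2.1.insert (pvKey p) (p.1, p.2), st.2.2 + 1)

theorem pvTriple_fold (L : List (Int × String)) (g : PySem.Dict String (PySem.Set String))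
    (m : PySem.Dict String (Int × String)) (c : Int) :
    L.foldl pvTripleStep (g, m, c)
      = (L.foldl (fun d p => d.insert (pvKey p) PySem.Set.empty) g,
         L.foldl (fun d p => d.insert (pvKey p) (p.1, p.2)) m,
         c + L.length) := by
  induction L generalizing g m c with
  | nil => simp
  | cons p L ih =>
      simp only [List.foldl_cons, List.length_cons]
      rw [ih]
      simp only [pvTripleStep]
      refine congrArg _ (congrArg _ ?_)
      omega

theorem pvNest_eq (cnf : List (List String)) :
    (PySem.List.enumerate cnf).foldl
      (fun (st : PySem.Dict String (PySem.Set String) × PySem.Dict String (Int × String) × Int) ic =>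
        ic.2.foldl (fun st literal =>
          (st.1.insert (pvNodeName ic.1 literal) PySem.Set.empty,
           st.2.1.insert (pvNodeName ic.1 literal) (ic.1, literal),
           st.2.2 + 1)) st)
      (PySem.Dict.empty, PySem.Dict.empty, (0 : Int))
    = (pvPairs cnf).foldl pvTripleStep (PySem.Dict.empty, PySem.Dict.empty, (0 : Int)) := by
  rw [pvPairs, List.foldl_flatMap]
  simp only [List.foldl_map]
  rfl

-- phase 1 of A computes (pvGraph0, pvInfo, count)
theorem pvPhase1_eq (cnf : List (List String)) :
    ((PySem.List.enumerate cnf).foldl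
      (fun (st : PySem.Dict String (PySem.Set String) × PySem.Dict String (Int × String) × Int) ic =>
        ic.2.foldl (fun st literal =>
          (st.1.insert (pvNodeName ic.1 literal) PySem.Set.empty,
           st.2.1.insert (pvNodeName ic.1 literal) (ic.1, literal),
           st.2.2 + 1)) st)
      (PySem.Dict.empty, PySem.Dict.empty, (0 : Int))).1 = pvGraph0 cnf ∧
    ((PySem.List.enumerate cnf).foldl
      (fun (st : PySem.Dict String (PySem.Set String) × PySem.Dict String (Int × String) × Int) ic =>
        ic.2.foldl (fun st literal =>
          (st.1.insert (pvNodeName ic.1 literal) PySem.Set.empty,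
           st.2.1.insert (pvNodeName ic.1 literal) (ic.1, literal),
           st.2.2 + 1)) st)
      (PySem.Dict.empty, PySem.Dict.empty, (0 : Int))).2.1 = pvInfo cnf := by
  constructor <;> (rw [pvNest_eq, pvTriple_fold]; rfl)

theorem pvInfo_keys_nodup (cnf : List (List String)) : (pvInfo cnf).keys.Nodup := by
  exact PySem.Dict.nodup_keys_foldl_insert_key _ pvKey _ _ (by simp [PySem.Dict.keys_empty])

theorem pvGraph0_keys (cnf : List (List String)) : (pvGraph0 cnf).keys = (pvInfo cnf).keys := by
  rw [pvGraph0, pvInfo, PySem.Dict.keys_foldl_insert_key _ pvKey,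
    PySem.Dict.keys_foldl_insert_key _ pvKey]
  rfl

theorem pvGraph0_getD (cnf : List (List String)) (k : String) :
    (pvGraph0 cnf).getD k PySem.Set.empty = PySem.Set.empty := by
  rw [pvGraph0]
  have aux : ∀ (L : List (Int × String)) (d : PySem.Dict String (PySem.Set String)),
      (∀ k', d.getD k' PySem.Set.empty = PySem.Set.empty) →
      ∀ k', (L.foldl (fun d p => d.insert (pvKey p) PySem.Set.empty) d).getD k' PySem.Set.empty = PySem.Set.empty := by
    intro L
    induction L with
    | nil => intro d h k'; simpa using h k'
    | cons p L ih =>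
        intro d h k'
        refine ih _ (fun k'' => ?_) k'
        rw [PySem.Dict.getD_insert]
        split
        · rfl
        · exact h k''
  exact aux _ _ (fun k' => PySem.Dict.getD_empty _ _) k

-- inner loop of phase 2: only entry u changes, by adding the passing v's
theorem pvInner_getD (nm : PySem.Dict String (Int × String)) (vs : List String)
    (g : PySem.Dict String (PySem.Set String)) (u k : String) :
    ((vs.foldl (fun g v => if pvCondA nm u v then g.modify u PySem.Set.empty (fun s => PySem.Set.add s v) else g) g).getD k PySem.Set.empty)
    = if k = u then (vs.filter (pvCondA nm u)).foldl PySem.Set.add (g.getD u PySem.Set.empty)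
      else g.getD k PySem.Set.empty := by
  induction vs generalizing g with
  | nil =>
      simp only [List.foldl_nil, List.filter_nil]
      split
      · next h => rw [h]
      · rfl
  | cons v vs ih =>
      simp only [List.foldl_cons, List.filter_cons]
      by_cases hc : pvCondA nm u v
      · rw [if_pos hc, if_pos hc, ih]
        by_cases hk : k = u
        · subst hk; simp
        · simp [PySem.Dict.getD_modify, hk]
      · rw [if_neg hc, if_neg hc, ih]

theorem pvInner_keys (nm : PySem.Dict String (Int × String)) (vs : List String)
    (g : PySem.Dict String (PySem.Set String)) (u : String) (hu : u ∈ g.keys) :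
    ((vs.foldl (fun g v => if pvCondA nm u v then g.modify u PySem.Set.empty (fun s => PySem.Set.add s v) else g) g).keys) = g.keys := by
  induction vs generalizing g with
  | nil => rfl
  | cons v vs ih =>
      simp only [List.foldl_cons]
      by_cases hc : pvCondA nm u v
      · rw [if_pos hc]
        have hk : (g.modify u PySem.Set.empty (fun s => PySem.Set.add s v)).keys = g.keys := by
          rw [PySem.Dict.keys_modify, PySem.Dict.keys_insert_of_contains]
          exact (PySem.Dict.contains_iff_mem_keys g u).mpr hu
        rw [ih _ (by rw [hk]; exact hu), hk]
      · rw [if_neg hc]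
        exact ih _ hu

theorem pvOuter_keys (nm : PySem.Dict String (Int × String)) (vs : List String) (us : List String)
    (g : PySem.Dict String (PySem.Set String)) (hus : ∀ u ∈ us, u ∈ g.keys) :
    ((us.foldl (fun g u => vs.foldl (fun g v => if pvCondA nm u v then g.modify u PySem.Set.empty (fun s => PySem.Set.add s v) else g) g) g).keys) = g.keys := by
  induction us generalizing g with
  | nil => rfl
  | cons u us ih =>
      simp only [List.foldl_cons]
      have h1 := pvInner_keys nm vs g u (hus u (by simp))
      rw [ih _ (fun u' hu' => by rw [h1]; exact hus u' (by simp [hu'])), h1]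

theorem pvOuter_getD (nm : PySem.Dict String (Int × String)) (vs : List String) (us : List String)
    (g : PySem.Dict String (PySem.Set String)) (k : String) (hnd : us.Nodup) :
    ((us.foldl (fun g u => vs.foldl (fun g v => if pvCondA nm u v then g.modify u PySem.Set.empty (fun s => PySem.Set.add s v) else g) g) g).getD k PySem.Set.empty)
    = if k ∈ us then (vs.filter (pvCondA nm k)).foldl PySem.Set.add (g.getD k PySem.Set.empty)
      else g.getD k PySem.Set.empty := by
  induction us generalizing g with
  | nil => simp
  | cons u us ih =>
      simp only [List.foldl_cons]
      have hnd' := (List.nodup_cons.mp hnd).2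
      have hnotmem := (List.nodup_cons.mp hnd).1
      rw [ih _ hnd']
      by_cases hk : k = u
      · subst hk
        rw [if_neg hnotmem, if_pos (by simp), pvInner_getD, if_pos rfl]
      · rw [pvInner_getD, if_neg hk]
        by_cases hm : k ∈ us
        · rw [if_pos hm, if_pos (by simp [hm])]
        · rw [if_neg hm, if_neg (by simp [hk, hm])]

-- the edge condition agrees with the canonical comprehension test on stored nodes
theorem pvCond_eq (cnf : List (List String)) (ul vl : String × Int × String)
    (hu : ul ∈ (pvInfo cnf).items) (hv : vl ∈ (pvInfo cnf).items) :
    pvCondA (pvInfo cnf) ul.1 vl.1 = decide (vl.2.1 ≠ ul.2.1 ∧ ul.2.2 ≠ pvNegate vl.2.2) := by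
  have hnd := pvInfo_keys_nodup cnf
  have hgu : (pvInfo cnf).getD ul.1 ((0 : Int), "") = ul.2 :=
    PySem.Dict.getD_of_mem_items _ (by exact hu) hnd _
  have hgv : (pvInfo cnf).getD vl.1 ((0 : Int), "") = vl.2 :=
    PySem.Dict.getD_of_mem_items _ (by exact hv) hnd _
  by_cases he : ul.1 = vl.1
  · have : ul.2 = vl.2 := by rw [← hgu, he, hgv]
    simp [pvCondA, he, this]
  · have hiff : (ul.2.1 ≠ vl.2.1 ∧ ul.2.2 ≠ pvNegate vl.2.2) ↔ (vl.2.1 ≠ ul.2.1 ∧ ul.2.2 ≠ pvNegate vl.2.2) := by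
      constructor <;> rintro ⟨h1, h2⟩ <;> exact ⟨h1.symm, h2⟩
    simp [pvCondA, hgu, hgv, he, hiff]

-- A's phase-2 loop body, rewritten through pvCondA
theorem pvOuterBody_eq (nm : PySem.Dict String (Int × String)) (ks : List String) :
    (fun (g : PySem.Dict String (PySem.Set String)) u =>
      ks.foldl (fun g v =>
        if u ≠ v then
          if (nm.getD u ((0 : Int), "")).1 ≠ (nm.getD v ((0 : Int), "")).1 ∧
             (nm.getD u ((0 : Int), "")).2 ≠ pvNegate (nm.getD v ((0 : Int), "")).2 then
            g.modify u PySem.Set.empty (fun s => PySem.Set.add s v)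
          else g
        else g) g)
    = fun g u => ks.foldl (fun g v =>
        if pvCondA nm u v then g.modify u PySem.Set.empty (fun s => PySem.Set.add s v) else g) g := by
  funext g u
  congr 1
  funext g v
  by_cases h1 : u = v
  · simp [pvCondA, h1]
  · by_cases h2 : (nm.getD u ((0 : Int), "")).1 ≠ (nm.getD v ((0 : Int), "")).1 ∧
        (nm.getD u ((0 : Int), "")).2 ≠ pvNegate (nm.getD v ((0 : Int), "")).2
    · simp [pvCondA, h1, h2]
    · simp [pvCondA, h1, h2]

-- A's result is the canonical value
theorem pvA_eq_canon (cnf : List (List String)) :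
    reduce_3sat_to_clique cnf = (pvCanon cnf, (cnf.length : Int)) := by
  simp only [reduce_3sat_to_clique, pvCanon]
  rw [(pvPhase1_eq cnf).1, (pvPhase1_eq cnf).2, pvOuterBody_eq]
  simp only [Prod.mk.injEq]
  refine ⟨?_, trivial⟩
  have hndks : (pvGraph0 cnf).keys.Nodup := by
    rw [pvGraph0_keys]; exact pvInfo_keys_nodup cnf
  have hkeysF :
      ((pvGraph0 cnf).keys.foldl (fun g u => (pvGraph0 cnf).keys.foldl (fun g v =>
        if pvCondA (pvInfo cnf) u v then g.modify u PySem.Set.empty (fun s => PySem.Set.add s v) else g) g)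
        (pvGraph0 cnf)).keys = (pvGraph0 cnf).keys :=
    pvOuter_keys (pvInfo cnf) (pvGraph0 cnf).keys (pvGraph0 cnf).keys (pvGraph0 cnf) (fun u hu => hu)
  rw [PySem.Dict.items_eq_map_keys _ (by rw [hkeysF]; exact hndks) PySem.Set.empty, hkeysF]
  have hgetD : ∀ k ∈ (pvGraph0 cnf).keys,
      ((pvGraph0 cnf).keys.foldl (fun g u => (pvGraph0 cnf).keys.foldl (fun g v =>
        if pvCondA (pvInfo cnf) u v then g.modify u PySem.Set.empty (fun s => PySem.Set.add s v) else g) g)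
        (pvGraph0 cnf)).getD k PySem.Set.empty
      = PySem.Set.ofList ((pvGraph0 cnf).keys.filter (pvCondA (pvInfo cnf) k)) := by
    intro k hk
    rw [pvOuter_getD _ _ _ _ _ hndks, if_pos hk, pvGraph0_getD, PySem.Set.ofList_eq_foldl]
    rfl
  rw [List.map_congr_left (fun k hk => by rw [hgetD k hk])]
  have hks2 : (pvGraph0 cnf).keys = (pvInfo cnf).items.map (·.1) := by
    rw [pvGraph0_keys]; rfl
  rw [hks2, List.map_map]
  apply List.map_congr_left
  intro ul hul
  simp only [Function.comp]
  refine congrArg _ ?_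
  rw [List.filter_map]
  refine congrArg _ (congrArg _ ?_)
  exact List.filter_congr (fun vl hvl => pvCond_eq cnf ul vl hul hvl)

-- ---------- B-side lemmas (B = pvCanon) ----------

-- per-clause distinct node list (name, literal), as B computes it
def pvCN (i : Int) (c : List String) : List (String × String) :=
  (c.foldl (fun (d : PySem.Dict String String) lit =>
    d.insert (pvNodeName i lit) lit) PySem.Dict.empty).items

def pvTag (i : Int) (p : String × String) : String × (Int × String) := (p.1, (i, p.2))

def pvEvList (ul vl : String × String) : List (String × String) :=
  (if ul.2 ≠ pvNegate vl.2 then [(ul.1, vl.1)] else []) ++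
  (if vl.2 ≠ pvNegate ul.2 then [(vl.1, ul.1)] else [])

def pvEv (g : PySem.Dict String (PySem.Set String)) (e : String × String) :
    PySem.Dict String (PySem.Set String) :=
  g.modify e.1 PySem.Set.empty (fun s => PySem.Set.add s e.2)

-- B's pair loop, flattened into one event list, clause pair by clause pair
def pvPE : List (List (String × String)) → List (String × String)
  | [] => []
  | c :: rest =>
      rest.flatMap (fun cj => c.flatMap (fun ul => cj.flatMap (fun vl => pvEvList ul vl))) ++ pvPE rest

-- per-clause adjacency block for a literal lk
def pvBlk (lk : String) (D : List (String × String)) : List String :=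
  (D.filter (fun q => decide (lk ≠ pvNegate q.2))).map (·.1)

-- ---------- node-name injectivity ----------

def pvDigits (n : Nat) : List Char :=
  if h : n < 10 then [Nat.digitChar n]
  else pvDigits (n / 10) ++ [Nat.digitChar (n % 10)]
decreasing_by exact Nat.div_lt_self (by omega) (by omega)

theorem pvToDigitsCore_eq : ∀ (f n : Nat) (acc : List Char), n < f →
    Nat.toDigitsCore 10 f n acc = pvDigits n ++ acc := by
  intro f
  induction f with
  | zero => omega
  | succ f ih =>
      intro n acc h
      rw [Nat.toDigitsCore]
      by_cases h0 : n / 10 = 0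
      · have hn : n < 10 := by omega
        simp only [h0, if_pos rfl]
        rw [pvDigits, dif_pos hn, Nat.mod_eq_of_lt hn]
        rfl
      · have hn : ¬ n < 10 := by omega
        simp only [if_neg h0]
        rw [ih (n / 10) _ (by have := Nat.div_lt_self (by omega : 0 < n) (by omega : 1 < 10); omega)]
        conv_rhs => rw [pvDigits]
        rw [dif_neg hn]
        simp

theorem pvToChars_nonneg (n : Int) (h : 0 ≤ n) : PySem.Int.toChars n = pvDigits n.toNat := by
  rw [PySem.Int.toChars, if_neg (by omega), Nat.toDigits,
    pvToDigitsCore_eq _ _ _ (Nat.lt_succ_self _), List.append_nil]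

theorem pvDigitChar_digit (k : Nat) (h : k < 10) : (Nat.digitChar k).isDigit = true := by
  interval_cases k <;> decide

theorem pvDigitChar_toNat (k : Nat) (h : k < 10) : (Nat.digitChar k).toNat = k + 48 := by
  interval_cases k <;> decide

theorem pvDigits_digit : ∀ (n : Nat), ∀ c ∈ pvDigits n, c.isDigit = true := by
  intro n
  induction n using Nat.strong_induction_on with
  | _ n ih =>
      intro c hc
      rw [pvDigits] at hc
      split at hc
      · next h => simp only [List.mem_singleton] at hc; subst hc; exact pvDigitChar_digit _ h
      · next h =>
          rcases List.mem_append.mp hc with hc | hc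
          · exact ih _ (Nat.div_lt_self (by omega) (by omega)) c hc
          · simp only [List.mem_singleton] at hc; subst hc
            exact pvDigitChar_digit _ (Nat.mod_lt _ (by omega))

theorem pvVal_digits : ∀ (n : Nat) (a : Nat),
    (pvDigits n).foldl (fun a c => 10 * a + (c.toNat - 48)) a
      = a * 10 ^ (pvDigits n).length + n := by
  intro n
  induction n using Nat.strong_induction_on with
  | _ n ih =>
      intro a
      rw [pvDigits]
      split
      · next h => simp [pvDigitChar_toNat _ h]; ring
      · next h =>
          rw [List.foldl_append, ih _ (Nat.div_lt_self (by omega) (by omega))]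
          simp only [List.foldl_cons, List.foldl_nil, List.length_append, List.length_singleton]
          rw [pvDigitChar_toNat _ (Nat.mod_lt _ (by omega)), pow_succ]
          have h2 : a * (10 ^ (pvDigits (n / 10)).length * 10)
              = 10 * (a * 10 ^ (pvDigits (n / 10)).length) := by ring
          rw [h2]
          omega

theorem pvDigits_inj {m n : Nat} (h : pvDigits m = pvDigits n) : m = n := by
  have hm := pvVal_digits m 0
  have hn := pvVal_digits n 0
  rw [h] at hm
  omega

theorem pvSplit_underscore : ∀ (a : List Char) (b : List Char) (l l' : List Char),
    (∀ c ∈ a, c ≠ '_') → (∀ c ∈ b, c ≠ '_') →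
    a ++ '_' :: l = b ++ '_' :: l' → a = b ∧ l = l' := by
  intro a
  induction a with
  | nil =>
      intro b l l' _ hb h
      cases b with
      | nil => simpa using h
      | cons x b =>
          simp only [List.nil_append, List.cons_append, List.cons.injEq] at h
          exact absurd h.1.symm (hb x (by simp))
  | cons x a ih =>
      intro b l l' ha hb h
      cases b with
      | nil =>
          simp only [List.cons_append, List.nil_append, List.cons.injEq] at h
          exact absurd h.1 (ha x (by simp))
      | cons y b =>
          simp only [List.cons_append, List.cons.injEq] at h
          obtain ⟨hab, hl⟩ := ih b l l' (fun c hc => ha c (by simp [hc])) (fun c hc => hb c (by simp [hc])) h.2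
          exact ⟨by rw [h.1, hab], hl⟩

theorem pvNodeName_toList (i : Int) (l : String) :
    (pvNodeName i l).toList = PySem.Int.toChars i ++ '_' :: l.toList := by
  rw [pvNodeName, String.toList_append, String.toList_append, PySem.Int.toList_toStr]
  have : ("_" : String).toList = ['_'] := rfl
  rw [this, List.append_assoc]
  rfl

theorem pvNodeName_inj {i j : Int} {l l' : String} (hi : 0 ≤ i) (hj : 0 ≤ j)
    (h : pvNodeName i l = pvNodeName j l') : i = j ∧ l = l' := by
  have ht : (pvNodeName i l).toList = (pvNodeName j l').toList := by rw [h]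
  rw [pvNodeName_toList, pvNodeName_toList, pvToChars_nonneg _ hi, pvToChars_nonneg _ hj] at ht
  have hnd : ∀ (m : Nat), ∀ c ∈ pvDigits m, c ≠ '_' := by
    intro m c hc
    have := pvDigits_digit m c hc
    intro he; subst he; simp at this
  obtain ⟨h1, h2⟩ := pvSplit_underscore _ _ _ _ (hnd i.toNat) (hnd j.toNat) ht
  refine ⟨by have := pvDigits_inj h1; omega, ?_⟩
  exact String.toList_inj.mp h2

-- ---------- enumerate / set / event-fold facts ----------

theorem pvEnum_idx_ge {α : Type} : ∀ (xs : List α) (s : Int), ∀ p ∈ PySem.List.enumerate xs s, s ≤ p.1 := by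
  intro xs
  induction xs with
  | nil => intro s p hp; simp [PySem.List.enumerate] at hp
  | cons x xs ih =>
      intro s p hp
      rw [show PySem.List.enumerate (x :: xs) s = (s, x) :: PySem.List.enumerate xs (s + 1) from rfl,
        List.mem_cons] at hp
      rcases hp with rfl | hp
      · simp
      · have := ih (s + 1) p hp
        omega

theorem pvEnum_pairwise {α : Type} : ∀ (xs : List α) (s : Int),
    (PySem.List.enumerate xs s).Pairwise (fun a b => a.1 ≠ b.1) := by
  intro xs
  induction xs with
  | nil => intro s; exact List.Pairwise.nil
  | cons x xs ih =>
      intro s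
      rw [show PySem.List.enumerate (x :: xs) s = (s, x) :: PySem.List.enumerate xs (s + 1) from rfl]
      refine List.Pairwise.cons ?_ (ih (s + 1))
      intro p hp
      have := pvEnum_idx_ge xs (s + 1) p hp
      simp only
      omega

theorem pvSet_add_mem (s : PySem.Set String) (x : String) (h : x ∈ s) : PySem.Set.add s x = s := by
  simp [PySem.Set.add, h]

theorem pvSet_update_absorb : ∀ (l : List String) (s : PySem.Set String),
    (∀ x ∈ l, x ∈ s) → PySem.Set.update s l = s := by
  intro l
  induction l with
  | nil => intro s _; rfl
  | cons x l ih =>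
      intro s h
      show PySem.Set.update (PySem.Set.add s x) l = s
      rw [pvSet_add_mem s x (h x (by simp))]
      exact ih s (fun y hy => h y (by simp [hy]))

theorem pvSet_foldl_add_nodup : ∀ (l : List String) (s : PySem.Set String),
    (s ++ l).Nodup → l.foldl PySem.Set.add s = s ++ l := by
  intro l
  induction l with
  | nil => intro s _; simp
  | cons x l ih =>
      intro s h
      have h' := List.nodup_append.mp h
      have hx : x ∉ s := fun hm => h'.2.2 x hm x (by simp) rfl
      show l.foldl PySem.Set.add (PySem.Set.add s x) = s ++ x :: l
      have hadd : PySem.Set.add s x = s ++ [x] := by simp [PySem.Set.add, hx]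
      rw [hadd, ih (s ++ [x]) (by simpa using h)]
      simp

theorem pvSet_ofList_nodup (l : List String) (h : l.Nodup) : PySem.Set.ofList l = l := by
  rw [PySem.Set.ofList_eq_foldl]
  have := pvSet_foldl_add_nodup l [] (by simpa using h)
  simpa using this

-- ---------- the event fold ----------

theorem pvEvFold_getD (evs : List (String × String)) (g : PySem.Dict String (PySem.Set String)) (k : String) :
    (evs.foldl pvEv g).getD k PySem.Set.empty
      = ((evs.filter (fun e => e.1 == k)).map (·.2)).foldl PySem.Set.add (g.getD k PySem.Set.empty) := by
  induction evs generalizing g with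
  | nil => rfl
  | cons e evs ih =>
      rw [List.foldl_cons, List.filter_cons, ih]
      by_cases hk : e.1 = k
      · rw [if_pos (by simp [hk])]
        simp only [List.map_cons, List.foldl_cons]
        congr 1
        rw [pvEv, PySem.Dict.getD_modify, if_pos hk.symm, hk]
      · rw [if_neg (by simp [hk])]
        congr 1
        rw [pvEv, PySem.Dict.getD_modify, if_neg (fun hh => hk hh.symm)]

theorem pvEvFold_keys (evs : List (String × String)) (g : PySem.Dict String (PySem.Set String))
    (h : ∀ e ∈ evs, e.1 ∈ g.keys) : (evs.foldl pvEv g).keys = g.keys := by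
  have hk := PySem.Dict.keys_foldl_modify_key evs (fun e : String × String => e.1)
    PySem.Set.empty (fun _ e s => PySem.Set.add s e.2) g
  rw [show (fun (d : PySem.Dict String (PySem.Set String)) (x : String × String) =>
        d.modify x.1 PySem.Set.empty (fun s => PySem.Set.add s x.2)) = pvEv from rfl] at hk
  rw [hk]
  exact pvSet_update_absorb _ _ (by
    intro x hx
    obtain ⟨e, he, rfl⟩ := List.mem_map.mp hx
    exact h e he)

-- B's innermost two conditional updates are the fold of the event list
theorem pvStep_eq (g : PySem.Dict String (PySem.Set String)) (ul vl : String × String) :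
    (let g1 := if ul.2 ≠ pvNegate vl.2 then
        g.modify ul.1 PySem.Set.empty (fun s => PySem.Set.add s vl.1) else g
     if vl.2 ≠ pvNegate ul.2 then
        g1.modify vl.1 PySem.Set.empty (fun s => PySem.Set.add s ul.1) else g1)
    = (pvEvList ul vl).foldl pvEv g := by
  show _ = (pvEvList ul vl).foldl pvEv g
  rw [pvEvList]
  by_cases h1 : ul.2 ≠ pvNegate vl.2 <;> by_cases h2 : vl.2 ≠ pvNegate ul.2
  · rw [if_pos h1, if_pos h1, if_pos h2, if_pos h2]; rfl
  · rw [if_pos h1, if_pos h1, if_neg h2, if_neg h2]; rfl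
  · rw [if_neg h1, if_neg h1, if_pos h2, if_pos h2]; rfl
  · rw [if_neg h1, if_neg h1, if_neg h2, if_neg h2]; rfl

-- the head block of the pair loop
theorem pvHead_eq (c cj : List (String × String)) (g : PySem.Dict String (PySem.Set String)) :
    c.foldl (fun g ul => cj.foldl (fun g vl =>
      let g1 := if ul.2 ≠ pvNegate vl.2 then
          g.modify ul.1 PySem.Set.empty (fun s => PySem.Set.add s vl.1) else g
      if vl.2 ≠ pvNegate ul.2 then
          g1.modify vl.1 PySem.Set.empty (fun s => PySem.Set.add s ul.1) else g1) g) g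
    = (c.flatMap (fun ul => cj.flatMap (fun vl => pvEvList ul vl))).foldl pvEv g := by
  rw [List.foldl_flatMap]
  refine List.foldl_ext _ _ g ?_
  intro g' ul _
  rw [List.foldl_flatMap]
  refine List.foldl_ext _ _ g' ?_
  intro g'' vl _
  exact pvStep_eq g'' ul vl

-- B's pair loop, peeled clause pair by clause pair
theorem pvPairLoop_eq (full : List (List (String × String))) :
    ∀ (L : List (List (String × String))) (s : Nat), full.drop s = L →
    ∀ g, (PySem.List.enumerate L (s : Int)).foldl (fun g ic =>
      (PySem.List.slice full (some (ic.1 + 1)) none).foldl (fun g cj =>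
        ic.2.foldl (fun g ul =>
          cj.foldl (fun (g : PySem.Dict String (PySem.Set String)) vl =>
            let g1 := if ul.2 ≠ pvNegate vl.2 then
                g.modify ul.1 PySem.Set.empty (fun s => PySem.Set.add s vl.1) else g
            if vl.2 ≠ pvNegate ul.2 then
                g1.modify vl.1 PySem.Set.empty (fun s => PySem.Set.add s ul.1) else g1) g) g) g) g
      = (pvPE L).foldl pvEv g := by
  intro L
  induction L with
  | nil => intro s _ g; rfl
  | cons c rest ih =>
      intro s hdrop g
      have hnext : full.drop (s + 1) = rest := by
        have h2 : full.drop (s + 1) = (full.drop s).drop 1 := by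
          rw [List.drop_drop]
        rw [h2, hdrop]
        rfl
      have hslice : PySem.List.slice full (some ((s : Int) + 1)) none = rest := by
        rw [PySem.List.slice_from full (by omega)]
        have h1 : ((s : Int) + 1).toNat = s + 1 := by omega
        rw [h1, hnext]
      rw [show PySem.List.enumerate (c :: rest) (s : Int)
            = ((s : Int), c) :: PySem.List.enumerate rest ((s : Int) + 1) from rfl]
      rw [List.foldl_cons]
      simp only [hslice]
      have hcast : ((s : Int) + 1) = ((s + 1 : Nat) : Int) := by push_cast; ring
      rw [hcast, ih (s + 1) hnext]
      show _ = (pvPE (c :: rest)).foldl pvEv g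
      rw [show pvPE (c :: rest)
            = rest.flatMap (fun cj => c.flatMap (fun ul => cj.flatMap (fun vl => pvEvList ul vl)))
              ++ pvPE rest from rfl]
      rw [List.foldl_append]
      congr 1
      rw [List.foldl_flatMap]
      refine List.foldl_ext _ _ g ?_
      intro g' cj _
      exact pvHead_eq c cj g'

-- ---------- the per-clause node dicts and pvInfo ----------

theorem pvContains_false {ν : Type} (d : PySem.Dict String ν) (k : String) (h : k ∉ d.keys) :
    d.contains k = false := by
  cases hc : d.contains k
  · rfl
  · exact absurd ((PySem.Dict.contains_iff_mem_keys d k).mp hc) h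

theorem pvCN_mem (i : Int) (c : List String) : ∀ p ∈ pvCN i c, p.1 = pvNodeName i p.2 := by
  rw [pvCN]
  have aux : ∀ (L : List String) (d : PySem.Dict String String),
      (∀ p ∈ d.items, p.1 = pvNodeName i p.2) →
      ∀ p ∈ (L.foldl (fun d lit => d.insert (pvNodeName i lit) lit) d).items, p.1 = pvNodeName i p.2 := by
    intro L
    induction L with
    | nil => intro d h; exact h
    | cons lit L ih =>
        intro d h
        refine ih _ (fun p hp => ?_)
        rcases (PySem.Dict.mem_items_insert _ _ _ _).mp hp with rfl | ⟨hp', _⟩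
        · rfl
        · exact h p hp'
  exact aux c PySem.Dict.empty (by intro p hp; simp [PySem.Dict.empty] at hp)

theorem pvCN_keys_nodup (i : Int) (c : List String) : ((pvCN i c).map (·.1)).Nodup := by
  have := PySem.Dict.nodup_keys_foldl_insert_key c (fun lit => pvNodeName i lit)
    (fun _ lit => lit) PySem.Dict.empty (by simp [PySem.Dict.keys_empty])
  exact this

-- inserting a clause into a dict whose extra prefix does not contain the clause's keys
theorem pvFoldTag (i : Int) : ∀ (c : List String) (pre : List (String × (Int × String))) (E : PySem.Dict String String),
    (∀ lit ∈ c, pvNodeName i lit ∉ pre.map (·.1)) →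
    (c.foldl (fun d lit => d.insert (pvNodeName i lit) (i, lit)) (PySem.Dict.mk (pre ++ E.items.map (pvTag i)))).items
      = pre ++ (c.foldl (fun d lit => d.insert (pvNodeName i lit) lit) E).items.map (pvTag i) := by
  intro c
  induction c with
  | nil => intro pre E _; rfl
  | cons lit c ih =>
      intro pre E h
      simp only [List.foldl_cons]
      have hkeys : (PySem.Dict.mk (pre ++ E.items.map (pvTag i))).keys
          = pre.map (·.1) ++ E.keys := by
        show (pre ++ E.items.map (pvTag i)).map (·.1) = pre.map (·.1) ++ E.items.map (·.1)
        rw [List.map_append, List.map_map]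
        rfl
      have hstep : (PySem.Dict.mk (pre ++ E.items.map (pvTag i))).insert (pvNodeName i lit) (i, lit)
          = PySem.Dict.mk (pre ++ (E.insert (pvNodeName i lit) lit).items.map (pvTag i)) := by
        apply PySem.Dict.ext
        by_cases hc : E.contains (pvNodeName i lit) = true
        · have hcd : (PySem.Dict.mk (pre ++ E.items.map (pvTag i))).contains (pvNodeName i lit) = true := by
            rw [PySem.Dict.contains_iff_mem_keys, hkeys]
            exact List.mem_append.mpr (Or.inr ((PySem.Dict.contains_iff_mem_keys E _).mp hc))
          rw [PySem.Dict.items_insert_of_contains _ _ hcd,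
            PySem.Dict.items_insert_of_contains _ _ hc]
          show (pre ++ E.items.map (pvTag i)).map _ = _
          rw [List.map_append]
          congr 1
          · refine (List.map_congr_left (fun p hp => ?_)).trans (List.map_id pre)
            have : (p.1 == pvNodeName i lit) = false := by
              simp only [beq_eq_false_iff_ne, ne_eq]
              intro he
              exact h lit (by simp) (he ▸ List.mem_map_of_mem hp)
            simp [this]
          · rw [List.map_map, List.map_map]
            refine List.map_congr_left (fun q hq => ?_)
            by_cases hq1 : q.1 = pvNodeName i lit
            · simp [pvTag, hq1]
            · simp [pvTag, hq1]
        · have hcd : (PySem.Dict.mk (pre ++ E.items.map (pvTag i))).contains (pvNodeName i lit) = false := by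
            apply pvContains_false
            rw [hkeys]
            intro hm
            rcases List.mem_append.mp hm with hm | hm
            · exact h lit (by simp) hm
            · exact hc ((PySem.Dict.contains_iff_mem_keys E _).mpr hm)
          rw [PySem.Dict.items_insert_of_not_contains _ _ hcd,
            PySem.Dict.items_insert_of_not_contains _ _ (by simpa using hc)]
          show (pre ++ E.items.map (pvTag i)) ++ [(pvNodeName i lit, (i, lit))] = _
          rw [List.map_append, List.append_assoc]
          rfl
      rw [hstep, ih pre _ (fun l hl => h l (by simp [hl]))]

theorem pvFoldClause (i : Int) (c : List String) (d : PySem.Dict String (Int × String))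
    (h : ∀ lit ∈ c, d.contains (pvNodeName i lit) = false) :
    (c.foldl (fun d lit => d.insert (pvNodeName i lit) (i, lit)) d).items
      = d.items ++ (pvCN i c).map (pvTag i) := by
  have hd : d = PySem.Dict.mk (d.items ++ (PySem.Dict.empty (κ := String) (ν := String)).items.map (pvTag i)) := by
    apply PySem.Dict.ext
    simp [PySem.Dict.empty]
  calc (c.foldl (fun d lit => d.insert (pvNodeName i lit) (i, lit)) d).items
      = (c.foldl (fun d lit => d.insert (pvNodeName i lit) (i, lit))
          (PySem.Dict.mk (d.items ++ (PySem.Dict.empty (κ := String) (ν := String)).items.map (pvTag i)))).items := by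
        rw [← hd]
    _ = d.items ++ (pvCN i c).map (pvTag i) := by
        rw [pvFoldTag i c d.items PySem.Dict.empty (fun lit hl hm => by
          have hc := (PySem.Dict.contains_iff_mem_keys d (pvNodeName i lit)).mpr hm
          rw [h lit hl] at hc
          exact Bool.false_ne_true hc)]
        rfl

theorem pvFoldClauses : ∀ (Z : List (Int × List String)) (d : PySem.Dict String (Int × String)),
    (∀ ic ∈ Z, 0 ≤ ic.1) → Z.Pairwise (fun a b => a.1 ≠ b.1) →
    (∀ ic ∈ Z, ∀ lit ∈ ic.2, d.contains (pvNodeName ic.1 lit) = false) →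
    (Z.foldl (fun d ic => ic.2.foldl (fun d lit => d.insert (pvNodeName ic.1 lit) (ic.1, lit)) d) d).items
      = d.items ++ Z.flatMap (fun ic => (pvCN ic.1 ic.2).map (pvTag ic.1)) := by
  intro Z
  induction Z with
  | nil => intro d _ _ _; simp
  | cons ic Z ih =>
      intro d hnn hpw hfr
      simp only [List.foldl_cons, List.flatMap_cons]
      have hstep := pvFoldClause ic.1 ic.2 d (hfr ic (by simp))
      set d' := ic.2.foldl (fun d lit => d.insert (pvNodeName ic.1 lit) (ic.1, lit)) d with hd'
      have hkeys' : d'.keys = d.keys ++ (pvCN ic.1 ic.2).map (·.1) := by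
        show d'.items.map (·.1) = d.items.map (·.1) ++ _
        rw [hstep, List.map_append, List.map_map]
        rfl
      rw [ih d' (fun jc hjc => hnn jc (by simp [hjc])) ((List.pairwise_cons.mp hpw).2)
        (fun jc hjc lit hlit => ?_), hstep, List.append_assoc]
      apply pvContains_false
      rw [hkeys']
      intro hm
      rcases List.mem_append.mp hm with hm | hm
      · have hc := (PySem.Dict.contains_iff_mem_keys d _).mpr hm
        rw [hfr jc (by simp [hjc]) lit hlit] at hc
        exact Bool.false_ne_true hc
      · obtain ⟨p, hp, hpe⟩ := List.mem_map.mp hm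
        have hpn := pvCN_mem ic.1 ic.2 p hp
        rw [hpn] at hpe
        have hne : jc.1 ≠ ic.1 := fun he => (List.pairwise_cons.mp hpw).1 jc hjc he.symm
        exact hne (pvNodeName_inj (hnn jc (by simp [hjc])) (hnn ic (by simp)) hpe.symm).1

theorem pvInfo_items (cnf : List (List String)) :
    (pvInfo cnf).items
      = (PySem.List.enumerate cnf).flatMap (fun ic => (pvCN ic.1 ic.2).map (pvTag ic.1)) := by
  have h1 : pvInfo cnf = (PySem.List.enumerate cnf).foldl
      (fun d ic => ic.2.foldl (fun d lit => d.insert (pvNodeName ic.1 lit) (ic.1, lit)) d)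
      PySem.Dict.empty := by
    rw [pvInfo, pvPairs, List.foldl_flatMap]
    simp only [List.foldl_map]
    rfl
  rw [h1, pvFoldClauses _ _ (fun ic hic => pvEnum_idx_ge cnf 0 ic hic) (pvEnum_pairwise cnf 0)
    (fun ic _ lit _ => by simp [PySem.Dict.contains_empty])]
  rfl

-- ---------- names of all nodes, in order ----------

theorem pvFlatMap_congr {α β : Type} (l : List α) (f g : α → List β)
    (h : ∀ a ∈ l, f a = g a) : l.flatMap f = l.flatMap g := by
  induction l with
  | nil => rfl
  | cons x l ih => simp only [List.flatMap_cons, h x (by simp), ih (fun a ha => h a (by simp [ha]))]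


def pvNames (cnf : List (List String)) : List String :=
  (PySem.List.enumerate cnf).flatMap (fun ic => (pvCN ic.1 ic.2).map (·.1))

theorem pvInfo_fst (cnf : List (List String)) :
    (pvInfo cnf).items.map (·.1) = pvNames cnf := by
  rw [pvInfo_items, pvNames, List.map_flatMap]
  refine pvFlatMap_congr _ _ _ (fun ic _ => ?_)
  rw [List.map_map]
  rfl

theorem pvNames_nodup (cnf : List (List String)) : (pvNames cnf).Nodup := by
  rw [← pvInfo_fst]
  exact pvInfo_keys_nodup cnf

-- ---------- small list helpers ----------

theorem pvFlatMap_nil {α β : Type} (l : List α) : l.flatMap (fun _ => ([] : List β)) = [] := by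
  induction l with
  | nil => rfl
  | cons x l ih => simp [ih]

theorem pvFilter_opt {c : Prop} [Decidable c] (x : String × String) (p : String × String → Bool) :
    (if c then [x] else []).filter p = if c then (if p x then [x] else []) else [] := by
  split_ifs <;> simp_all

theorem pvFlatMap_ite' {α β : Type} (l : List α) (c : α → Prop) [DecidablePred c] (f : α → β) :
    l.flatMap (fun a => if c a then [f a] else []) = (l.filter (fun a => decide (c a))).map f := by
  induction l with
  | nil => rfl
  | cons x l ih => by_cases h : c x <;> simp [h, ih]

theorem pvHit {E : Type} : ∀ (C : List (String × String)) (k lk : String),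
    (C.map (·.1)).Nodup → (k, lk) ∈ C → ∀ (h : String × String → List E),
    C.flatMap (fun ul => if ul.1 = k then h ul else []) = h (k, lk) := by
  intro C
  induction C with
  | nil => intro k lk _ hm; exact absurd hm (by simp)
  | cons c C ih =>
      intro k lk hnd hm h
      simp only [List.map_cons] at hnd
      rw [List.flatMap_cons]
      rcases List.mem_cons.mp hm with rfl | hm'
      · rw [if_pos rfl]
        have hrest : C.flatMap (fun ul => if ul.1 = k then h ul else []) = [] := by
          have hnk : ∀ ul ∈ C, ul.1 ≠ k := by
            intro ul hul he
            have h1 := (List.nodup_cons.mp hnd).1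
            have h2 : ul.1 ∈ C.map (·.1) :=
              List.mem_map_of_mem (f := fun x : String × String => x.1) hul
            exact h1 (he ▸ h2)
          rw [pvFlatMap_congr C _ (fun _ => []) (fun ul hul => if_neg (hnk ul hul)), pvFlatMap_nil]
        rw [hrest, List.append_nil]
      · have hck : c.1 ≠ k := by
          intro he
          have h1 := (List.nodup_cons.mp hnd).1
          have h2 : k ∈ C.map (·.1) := by
            have := List.mem_map_of_mem (f := fun x : String × String => x.1) hm'
            simpa using this
          exact absurd h2 (he ▸ h1)
        rw [if_neg hck, ih k lk (List.nodup_cons.mp hnd).2 hm' h]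
        rfl

-- ---------- event keys come from the clause lists ----------

theorem pvEvList_fst (ul vl : String × String) : ∀ e ∈ pvEvList ul vl, e.1 = ul.1 ∨ e.1 = vl.1 := by
  intro e he
  rw [pvEvList] at he
  rcases List.mem_append.mp he with h | h <;> [skip; skip] <;>
    (split at h <;> simp_all)

theorem pvPE_fst : ∀ (L : List (List (String × String))), ∀ e ∈ pvPE L,
    e.1 ∈ L.flatMap (fun D => D.map (·.1)) := by
  intro L
  induction L with
  | nil => intro e he; exact absurd he (by simp [pvPE])
  | cons c rest ih =>
      intro e he
      rw [show pvPE (c :: rest)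
            = rest.flatMap (fun cj => c.flatMap (fun ul => cj.flatMap (fun vl => pvEvList ul vl)))
              ++ pvPE rest from rfl] at he
      rw [List.flatMap_cons]
      rcases List.mem_append.mp he with h | h
      · obtain ⟨cj, hcj, h⟩ := List.mem_flatMap.mp h
        obtain ⟨ul, hul, h⟩ := List.mem_flatMap.mp h
        obtain ⟨vl, hvl, h⟩ := List.mem_flatMap.mp h
        rcases pvEvList_fst ul vl e h with h1 | h1
        · exact List.mem_append.mpr (Or.inl (h1 ▸ List.mem_map_of_mem hul))
        · refine List.mem_append.mpr (Or.inr ?_)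
          exact List.mem_flatMap.mpr ⟨cj, hcj, h1 ▸ List.mem_map_of_mem hvl⟩
      · exact List.mem_append.mpr (Or.inr (ih e h))

theorem pvPE_filter_none (M : List (List (String × String))) (k : String)
    (h : ∀ D ∈ M, k ∉ D.map (·.1)) : (pvPE M).filter (fun e => e.1 == k) = [] := by
  rw [List.filter_eq_nil_iff]
  intro e he
  simp only [beq_iff_eq]
  intro hek
  obtain ⟨D, hD, hmem⟩ := List.mem_flatMap.mp (pvPE_fst M e he)
  exact h D hD (hek ▸ hmem)

-- filter of one head-block where the left clause C contains the key
theorem pvSubA (C cj : List (String × String)) (k lk : String)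
    (hndC : (C.map (·.1)).Nodup) (hmC : (k, lk) ∈ C) (hcj : k ∉ cj.map (·.1)) :
    (C.flatMap (fun ul => cj.flatMap (fun vl => pvEvList ul vl))).filter (fun e => e.1 == k)
      = (cj.filter (fun vl => decide (lk ≠ pvNegate vl.2))).map (fun vl => (k, vl.1)) := by
  rw [List.filter_flatMap]
  have hstep : ∀ ul ∈ C,
      (cj.flatMap (fun vl => pvEvList ul vl)).filter (fun e => e.1 == k)
        = if ul.1 = k then cj.flatMap (fun vl =>
            if ul.2 ≠ pvNegate vl.2 then [(ul.1, vl.1)] else []) else [] := by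
    intro ul _
    rw [List.filter_flatMap]
    have hper : ∀ vl ∈ cj,
        (pvEvList ul vl).filter (fun e => e.1 == k)
          = if ul.1 = k then (if ul.2 ≠ pvNegate vl.2 then [(ul.1, vl.1)] else []) else [] := by
      intro vl hvl
      rw [pvEvList, List.filter_append, pvFilter_opt, pvFilter_opt]
      have h2 : ((vl.1, ul.1).1 == k) = false := by
        simp only [beq_eq_false_iff_ne, ne_eq]
        intro he
        exact hcj (he ▸ List.mem_map_of_mem (f := fun x : String × String => x.1) hvl)
      rw [h2]
      by_cases hul : ul.1 = k
      · have h1 : ((ul.1, vl.1).1 == k) = true := by simpa using hul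
        rw [h1, if_pos hul]
        simp
      · have h1 : ((ul.1, vl.1).1 == k) = false := by simpa using hul
        rw [h1, if_neg hul]
        simp
    rw [pvFlatMap_congr _ _ _ hper]
    by_cases hul : ul.1 = k
    · rw [if_pos hul]
      exact pvFlatMap_congr _ _ _ (fun vl _ => if_pos hul)
    · rw [if_neg hul]
      exact (pvFlatMap_congr _ _ (fun _ => []) (fun vl _ => if_neg hul)).trans (pvFlatMap_nil cj)
  rw [pvFlatMap_congr _ _ _ hstep, pvHit C k lk hndC hmC, pvFlatMap_ite']

-- filter of one head-block where neither side contains the key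
theorem pvSubB1 (D cj : List (String × String)) (k : String)
    (hD : k ∉ D.map (·.1)) (hcj : k ∉ cj.map (·.1)) :
    (D.flatMap (fun ul => cj.flatMap (fun vl => pvEvList ul vl))).filter (fun e => e.1 == k) = [] := by
  rw [List.filter_flatMap]
  refine (pvFlatMap_congr _ _ (fun _ => []) (fun ul hul => ?_)).trans (pvFlatMap_nil D)
  rw [List.filter_flatMap]
  refine (pvFlatMap_congr _ _ (fun _ => []) (fun vl hvl => ?_)).trans (pvFlatMap_nil cj)
  rw [pvEvList, List.filter_append, pvFilter_opt, pvFilter_opt]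
  have h1 : ((ul.1, vl.1).1 == k) = false := by
    simp only [beq_eq_false_iff_ne, ne_eq]
    intro he
    exact hD (he ▸ List.mem_map_of_mem (f := fun x : String × String => x.1) hul)
  have h2 : ((vl.1, ul.1).1 == k) = false := by
    simp only [beq_eq_false_iff_ne, ne_eq]
    intro he
    exact hcj (he ▸ List.mem_map_of_mem (f := fun x : String × String => x.1) hvl)
  rw [h1, h2]
  simp

-- filter of one head-block where the right clause C contains the key
theorem pvSubB2 (D C : List (String × String)) (k lk : String)
    (hD : k ∉ D.map (·.1)) (hndC : (C.map (·.1)).Nodup) (hmC : (k, lk) ∈ C) :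
    (D.flatMap (fun ul => C.flatMap (fun vl => pvEvList ul vl))).filter (fun e => e.1 == k)
      = (D.filter (fun ul => decide (lk ≠ pvNegate ul.2))).map (fun ul => (k, ul.1)) := by
  rw [List.filter_flatMap]
  have hstep : ∀ ul ∈ D,
      (C.flatMap (fun vl => pvEvList ul vl)).filter (fun e => e.1 == k)
        = if lk ≠ pvNegate ul.2 then [(k, ul.1)] else [] := by
    intro ul hul
    rw [List.filter_flatMap]
    have hper : ∀ vl ∈ C,
        (pvEvList ul vl).filter (fun e => e.1 == k)
          = if vl.1 = k then (if vl.2 ≠ pvNegate ul.2 then [(k, ul.1)] else []) else [] := by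
      intro vl _
      rw [pvEvList, List.filter_append, pvFilter_opt, pvFilter_opt]
      have h1 : ((ul.1, vl.1).1 == k) = false := by
        simp only [beq_eq_false_iff_ne, ne_eq]
        intro he
        exact hD (he ▸ List.mem_map_of_mem (f := fun x : String × String => x.1) hul)
      rw [h1]
      by_cases hv : vl.1 = k
      · have h2 : ((vl.1, ul.1).1 == k) = true := by simpa using hv
        rw [h2, if_pos hv, hv]
        simp
      · have h2 : ((vl.1, ul.1).1 == k) = false := by simpa using hv
        rw [h2, if_neg hv]
        simp
    rw [pvFlatMap_congr _ _ _ hper, pvHit C k lk hndC hmC]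
  rw [pvFlatMap_congr _ _ _ hstep, pvFlatMap_ite']

-- the main filtered-events computation
theorem pvPE_filter : ∀ (P : List (List (String × String))) (C : List (String × String))
    (Q : List (List (String × String))) (k lk : String),
    (∀ D ∈ P, k ∉ D.map (·.1)) → (∀ D ∈ Q, k ∉ D.map (·.1)) →
    (C.map (·.1)).Nodup → (k, lk) ∈ C →
    ((pvPE (P ++ C :: Q)).filter (fun e => e.1 == k)).map (·.2)
      = P.flatMap (pvBlk lk) ++ Q.flatMap (pvBlk lk) := by
  intro P
  induction P with
  | nil =>
      intro C Q k lk _ hQ hndC hmC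
      rw [List.nil_append]
      rw [show pvPE (C :: Q)
            = Q.flatMap (fun cj => C.flatMap (fun ul => cj.flatMap (fun vl => pvEvList ul vl)))
              ++ pvPE Q from rfl]
      rw [List.filter_append, pvPE_filter_none Q k hQ, List.append_nil]
      rw [List.filter_flatMap]
      rw [pvFlatMap_congr _ _ _ (fun cj hcj => pvSubA C cj k lk hndC hmC (hQ cj hcj))]
      rw [List.map_flatMap]
      simp only [List.flatMap_nil, List.nil_append]
      refine (pvFlatMap_congr _ _ _ (fun cj _ => ?_))
      rw [List.map_map]
      rfl
  | cons D P' ih =>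
      intro C Q k lk hP hQ hndC hmC
      rw [List.cons_append]
      rw [show pvPE (D :: (P' ++ C :: Q))
            = (P' ++ C :: Q).flatMap (fun cj => D.flatMap (fun ul => cj.flatMap (fun vl => pvEvList ul vl)))
              ++ pvPE (P' ++ C :: Q) from rfl]
      rw [List.filter_append, List.map_append]
      rw [ih C Q k lk (fun E hE => hP E (by simp [hE])) hQ hndC hmC]
      have hD : k ∉ D.map (·.1) := hP D (by simp)
      have hhead : ((P' ++ C :: Q).flatMap (fun cj => D.flatMap (fun ul => cj.flatMap (fun vl => pvEvList ul vl)))).filter (fun e => e.1 == k)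
          = (D.filter (fun ul => decide (lk ≠ pvNegate ul.2))).map (fun ul => (k, ul.1)) := by
        rw [List.flatMap_append, List.flatMap_cons, List.filter_append, List.filter_append]
        have hPpart : ((P'.flatMap (fun cj => D.flatMap (fun ul => cj.flatMap (fun vl => pvEvList ul vl)))).filter (fun e => e.1 == k)) = [] := by
          rw [List.filter_flatMap]
          exact (pvFlatMap_congr _ _ (fun _ => [])
            (fun cj hcj => pvSubB1 D cj k hD (hP cj (by simp [hcj])))).trans (pvFlatMap_nil P')
        have hQpart : ((Q.flatMap (fun cj => D.flatMap (fun ul => cj.flatMap (fun vl => pvEvList ul vl)))).filter (fun e => e.1 == k)) = [] := by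
          rw [List.filter_flatMap]
          exact (pvFlatMap_congr _ _ (fun _ => [])
            (fun cj hcj => pvSubB1 D cj k hD (hQ cj hcj))).trans (pvFlatMap_nil Q)
        rw [hPpart, hQpart, pvSubB2 D C k lk hD hndC hmC]
        simp
      rw [hhead, List.map_map]
      rw [show ((fun e : String × String => e.2) ∘ fun ul : String × String => (k, ul.1))
            = (fun ul : String × String => ul.1) from rfl]
      rw [List.flatMap_cons]
      rw [show (D.filter (fun ul => decide (lk ≠ pvNegate ul.2))).map (fun ul : String × String => ul.1)
            = pvBlk lk D from rfl]
      rw [List.append_assoc]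

-- ---------- B's initial graph ----------

def pvClauses (cnf : List (List String)) : List (List (String × String)) :=
  (PySem.List.enumerate cnf).map (fun ic => pvCN ic.1 ic.2)

def pvBG0 (cnf : List (List String)) : PySem.Dict String (PySem.Set String) :=
  (pvClauses cnf).foldl (fun g nodes =>
    nodes.foldl (fun g ul => g.insert ul.1 PySem.Set.empty) g) PySem.Dict.empty

theorem pvClauses_fstFlat (cnf : List (List String)) :
    (pvClauses cnf).flatMap (fun D => D.map (·.1)) = pvNames cnf := by
  rw [pvClauses, pvNames, List.flatMap_map]

theorem pvBG0_flat (cnf : List (List String)) :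
    pvBG0 cnf = ((pvClauses cnf).flatMap id).foldl
      (fun g (ul : String × String) => g.insert ul.1 PySem.Set.empty) PySem.Dict.empty := by
  rw [pvBG0, List.foldl_flatMap]
  rfl

theorem pvBG0_keys (cnf : List (List String)) : (pvBG0 cnf).keys = pvNames cnf := by
  rw [pvBG0_flat]
  rw [PySem.Dict.keys_foldl_insert_key _ (fun ul : String × String => ul.1)
    (fun _ _ => PySem.Set.empty) PySem.Dict.empty]
  have h1 : ((pvClauses cnf).flatMap id).map (fun ul : String × String => ul.1) = pvNames cnf := by
    rw [List.map_flatMap, ← pvClauses_fstFlat]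
    rfl
  rw [show (PySem.Dict.empty : PySem.Dict String (PySem.Set String)).keys = [] from rfl]
  show PySem.Set.update [] _ = _
  rw [PySem.Set.update, ← PySem.Set.ofList_eq_foldl, h1]
  exact pvSet_ofList_nodup _ (pvNames_nodup cnf)

theorem pvBG0_getD (cnf : List (List String)) (k : String) :
    (pvBG0 cnf).getD k PySem.Set.empty = PySem.Set.empty := by
  rw [pvBG0_flat]
  have aux : ∀ (L : List (String × String)) (d : PySem.Dict String (PySem.Set String)),
      (∀ k', d.getD k' PySem.Set.empty = PySem.Set.empty) →
      ∀ k', (L.foldl (fun d p => d.insert p.1 PySem.Set.empty) d).getD k' PySem.Set.empty = PySem.Set.empty := by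
    intro L
    induction L with
    | nil => intro d h k'; simpa using h k'
    | cons p L ih =>
        intro d h k'
        refine ih _ (fun k'' => ?_) k'
        rw [PySem.Dict.getD_insert]
        split
        · rfl
        · exact h k''
  exact aux _ _ (fun k' => PySem.Dict.getD_empty _ _) k

-- ---------- the value of B's graph at each node ----------

theorem pvBVal (cnf : List (List String)) (ul : String × Int × String)
    (hul : ul ∈ (pvInfo cnf).items) :
    ((pvPE (pvClauses cnf)).foldl pvEv (pvBG0 cnf)).getD ul.1 PySem.Set.empty
      = PySem.Set.ofList (((pvInfo cnf).items.filter
          (fun vl => decide (vl.2.1 ≠ ul.2.1 ∧ ul.2.2 ≠ pvNegate vl.2.2))).map (·.1)) := by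
  obtain ⟨k, i, lk⟩ := ul
  simp only
  rw [pvInfo_items] at hul
  obtain ⟨ic, hic, hul2⟩ := List.mem_flatMap.mp hul
  obtain ⟨p, hp, hpe⟩ := List.mem_map.mp hul2
  rw [pvTag, Prod.mk.injEq, Prod.mk.injEq] at hpe
  obtain ⟨hpk, hii, hplk⟩ := hpe
  subst hpk
  subst hii
  subst hplk
  obtain ⟨Z1, Z2, hZ⟩ := List.append_of_mem hic
  have hC : pvClauses cnf
      = Z1.map (fun jc => pvCN jc.1 jc.2) ++ pvCN ic.1 ic.2 :: Z2.map (fun jc => pvCN jc.1 jc.2) := by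
    rw [pvClauses, hZ, List.map_append, List.map_cons]
  have hnames : pvNames cnf
      = Z1.flatMap (fun jc => (pvCN jc.1 jc.2).map (·.1))
        ++ ((pvCN ic.1 ic.2).map (·.1) ++ Z2.flatMap (fun jc => (pvCN jc.1 jc.2).map (·.1))) := by
    rw [pvNames, hZ, List.flatMap_append, List.flatMap_cons]
  have hnd := pvNames_nodup cnf
  rw [hnames] at hnd
  have hkC : p.1 ∈ (pvCN ic.1 ic.2).map (·.1) :=
    List.mem_map_of_mem (f := fun x : String × String => x.1) hp
  have hnd2 := List.nodup_append.mp hnd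
  have hkA1 : p.1 ∉ Z1.flatMap (fun jc => (pvCN jc.1 jc.2).map (·.1)) := by
    intro hmem
    exact hnd2.2.2 _ hmem _ (List.mem_append.mpr (Or.inl hkC)) rfl
  have hnd3 := List.nodup_append.mp hnd2.2.1
  have hkA2 : p.1 ∉ Z2.flatMap (fun jc => (pvCN jc.1 jc.2).map (·.1)) := by
    intro hmem
    exact hnd3.2.2 _ hkC _ hmem rfl
  have hkP : ∀ D ∈ Z1.map (fun jc => pvCN jc.1 jc.2), p.1 ∉ D.map (·.1) := by
    intro D hD hmem
    obtain ⟨jc, hjc, rfl⟩ := List.mem_map.mp hD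
    exact hkA1 (List.mem_flatMap.mpr ⟨jc, hjc, hmem⟩)
  have hkQ : ∀ D ∈ Z2.map (fun jc => pvCN jc.1 jc.2), p.1 ∉ D.map (·.1) := by
    intro D hD hmem
    obtain ⟨jc, hjc, rfl⟩ := List.mem_map.mp hD
    exact hkA2 (List.mem_flatMap.mpr ⟨jc, hjc, hmem⟩)
  -- index distinctness
  have hpw := pvEnum_pairwise cnf 0
  rw [hZ] at hpw
  have hpw2 := (List.pairwise_append.mp hpw)
  have hidx1 : ∀ jc ∈ Z1, jc.1 ≠ ic.1 := fun jc hjc => hpw2.2.2 jc hjc ic (by simp)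
  have hidx2 : ∀ jc ∈ Z2, jc.1 ≠ ic.1 :=
    fun jc hjc he => (List.pairwise_cons.mp hpw2.2.1).1 jc hjc he.symm
  -- the events side
  rw [pvEvFold_getD, pvBG0_getD, hC,
    pvPE_filter _ _ _ _ p.2 hkP hkQ (pvCN_keys_nodup ic.1 ic.2) hp]
  rw [show (PySem.Set.empty : PySem.Set String) = [] from rfl, ← PySem.Set.ofList_eq_foldl]
  -- the canonical side
  have hcanon : (((pvInfo cnf).items.filter
        (fun vl => decide (vl.2.1 ≠ ic.1 ∧ p.2 ≠ pvNegate vl.2.2))).map (·.1))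
      = (Z1.map (fun jc => pvCN jc.1 jc.2)).flatMap (pvBlk p.2)
        ++ (Z2.map (fun jc => pvCN jc.1 jc.2)).flatMap (pvBlk p.2) := by
    rw [pvInfo_items, hZ, List.flatMap_append, List.flatMap_cons,
      List.filter_append, List.filter_append, List.map_append, List.map_append]
    have hmid : (((pvCN ic.1 ic.2).map (pvTag ic.1)).filter
        (fun vl => decide (vl.2.1 ≠ ic.1 ∧ p.2 ≠ pvNegate vl.2.2))) = [] := by
      rw [List.filter_eq_nil_iff]
      intro e he
      obtain ⟨q, _, rfl⟩ := List.mem_map.mp he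
      simp [pvTag]
    have hside : ∀ (Z' : List (Int × List String)), (∀ jc ∈ Z', jc.1 ≠ ic.1) →
        ((Z'.flatMap (fun jc => (pvCN jc.1 jc.2).map (pvTag jc.1))).filter
            (fun vl => decide (vl.2.1 ≠ ic.1 ∧ p.2 ≠ pvNegate vl.2.2))).map (·.1)
          = (Z'.map (fun jc => pvCN jc.1 jc.2)).flatMap (pvBlk p.2) := by
      intro Z' hZ'
      rw [List.filter_flatMap, List.map_flatMap, List.flatMap_map]
      refine pvFlatMap_congr _ _ _ (fun jc hjc => ?_)
      rw [List.filter_map, List.map_map]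
      have hfe : ∀ q ∈ pvCN jc.1 jc.2,
          ((fun vl : String × Int × String => decide (vl.2.1 ≠ ic.1 ∧ p.2 ≠ pvNegate vl.2.2))
            ∘ pvTag jc.1) q = decide (p.2 ≠ pvNegate q.2) := by
        intro q _
        simp [pvTag, hZ' jc hjc]
      rw [List.filter_congr hfe]
      rfl
    rw [hmid, hside Z1 hidx1, hside Z2 hidx2]
    simp
  rw [hcanon]

theorem pvBKeys (cnf : List (List String)) :
    ((pvPE (pvClauses cnf)).foldl pvEv (pvBG0 cnf)).keys = pvNames cnf := by
  rw [pvEvFold_keys, pvBG0_keys]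
  intro e he
  rw [pvBG0_keys]
  rw [← pvClauses_fstFlat]
  exact pvPE_fst _ e he

theorem pvB_eq_canon (cnf : List (List String)) :
    reduce_3sat_to_clique_alt cnf = (pvCanon cnf, (cnf.length : Int)) := by
  have h0 : reduce_3sat_to_clique_alt cnf
      = (((PySem.List.enumerate (pvClauses cnf)).foldl (fun g ic =>
          (PySem.List.slice (pvClauses cnf) (some (ic.1 + 1)) none).foldl (fun g cj =>
            ic.2.foldl (fun g ul =>
              cj.foldl (fun (g : PySem.Dict String (PySem.Set String)) vl =>
                let g1 := if ul.2 ≠ pvNegate vl.2 then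
                    g.modify ul.1 PySem.Set.empty (fun s => PySem.Set.add s vl.1) else g
                if vl.2 ≠ pvNegate ul.2 then
                    g1.modify vl.1 PySem.Set.empty (fun s => PySem.Set.add s ul.1) else g1) g) g) g)
          (pvBG0 cnf)).items,
        (cnf.length : Int)) := rfl
  rw [h0]
  have h1 := pvPairLoop_eq (pvClauses cnf) (pvClauses cnf) 0 (List.drop_zero) (pvBG0 cnf)
  simp only [Nat.cast_zero] at h1
  rw [h1]
  have hkeys := pvBKeys cnf
  rw [PySem.Dict.items_eq_map_keys _ (by rw [hkeys]; exact pvNames_nodup cnf) PySem.Set.empty, hkeys]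
  rw [← pvInfo_fst, List.map_map]
  simp only [Prod.mk.injEq]
  refine ⟨?_, trivial⟩
  rw [pvCanon]
  apply List.map_congr_left
  intro ul hul
  simp only [Function.comp]
  rw [pvBVal cnf ul hul]

-- ===== VERDICT (by name: the statement is the Claim_ definition above) =====
theorem reduce_3sat_to_clique_spec : Claim_equal_reduce_3sat_to_clique := by
  intro cnf _
  unfold Spec_reduce_3sat_to_clique
  rw [pvA_eq_canon, pvB_eq_canon]
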